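-- pv_equiv track=rewrite | github.com/microsoft/ML-For-Beginners | .venv/Lib/site-packages/fontTools/cffLib/specializer.py | hvcurveto
-- ===== SOURCE A (Python) =====
-- def _everyN(el, n):
--     """Group the list el into groups of size n"""
--     if len(el) % n != 0:
--         raise ValueError(el)
--     for i in range(0, len(el), n):
--         yield el[i : i + n]
--
-- def hvcurveto(args):
--     if len(args) < 4 or len(args) % 8 not in {0, 1, 4, 5}:
--         raise ValueError(args)
--     last_args = None
--     if len(args) % 2 == 1:
--         lastStraight = len(args) % 8 == 5
--         args, last_args = args[:-5], args[-5:]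
--     it = _everyN(args, 4)
--     try:
--         while True:
--             args = next(it)
--             yield ("rrcurveto", [args[0], 0, args[1], args[2], 0, args[3]])
--             args = next(it)
--             yield ("rrcurveto", [0, args[0], args[1], args[2], args[3], 0])
--     except StopIteration:
--         pass
--     if last_args:
--         args = last_args
--         if lastStraight:
--             yield ("rrcurveto", [args[0], 0, args[1], args[2], args[4], args[3]])
--         else:
--             yield ("rrcurveto", [0, args[0], args[1], args[2], args[3], args[4]])
-- ===== SOURCE B (Python) =====
-- # Element-wise state machine: one pass over the flat args, dispatching each value
-- # into a zero-initialised 6-slot buffer at a position given by a phase table,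
-- # flushing the buffer every 4 values; no chunking and no twin-emit loop.
-- _POS = (0, 2, 3, 5, 1, 2, 3, 4)
--
-- def hvcurveto(args):
--     n = len(args)
--     if n < 4 or n % 8 not in {0, 1, 4, 5}:
--         raise ValueError(args)
--     body_len = n - 5 if n % 2 == 1 else n
--     out = []
--     buf = [0, 0, 0, 0, 0, 0]
--     phase = 0
--     for k in range(body_len):
--         buf[_POS[phase]] = args[k]
--         phase = (phase + 1) % 8
--         if phase % 4 == 0:
--             out.append(("rrcurveto", buf))
--             buf = [0, 0, 0, 0, 0, 0]
--     if n % 2 == 1: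
--         t = args[body_len:]
--         if n % 8 == 5:
--             out.append(("rrcurveto", [t[0], 0, t[1], t[2], t[4], t[3]]))
--         else:
--             out.append(("rrcurveto", [0, t[0], t[1], t[2], t[3], t[4]]))
--     return out
-- ===== Notes on version B (the rewrite author's own statement) =====
-- stated objective: alternative
-- what changed: Replaced A's chunk-into-4s generator with twin next()/next() emits and StopIteration control flow by a single element-wise pass with a phase state machine: each argument is dispatched into a zero-initialised 6-slot buffer at a position read from an 8-entry phase table, and the buffer is flushed every 4 values; no chunking at all.
import Mathlib
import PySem

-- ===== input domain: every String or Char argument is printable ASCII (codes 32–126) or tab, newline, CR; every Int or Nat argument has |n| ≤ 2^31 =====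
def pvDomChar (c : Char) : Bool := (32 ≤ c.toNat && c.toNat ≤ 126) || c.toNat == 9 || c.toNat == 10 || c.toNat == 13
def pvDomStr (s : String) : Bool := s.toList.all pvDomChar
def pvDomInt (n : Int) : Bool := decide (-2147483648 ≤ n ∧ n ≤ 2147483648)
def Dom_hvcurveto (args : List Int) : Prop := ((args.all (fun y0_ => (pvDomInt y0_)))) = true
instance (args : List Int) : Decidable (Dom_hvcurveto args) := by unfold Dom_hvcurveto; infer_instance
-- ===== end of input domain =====

-- B replaces A's chunk-into-4s twin-emit generator (while True / next / next / StopIteration) by a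
-- single element-wise pass: a phase state machine dispatches each argument into a zero-initialised
-- 6-slot buffer at a table-given position and flushes every 4 values (objective: alternative).
-- A is a generator in Python; equivalence is about the list of yielded items (list(hvcurveto(args))).

-- ===== PORT A =====
-- `_everyN(el, 4)`: groups of 4. Exact whenever `len(el) % 4 == 0`; inside hvcurveto's
-- non-raising inputs (Pre_) the list it is applied to always has length divisible by 4,
-- so the ValueError branch of `_everyN` is unreachable there.
def pvEveryN4 : List Int → List (Int × Int × Int × Int)
  | a :: b :: c :: d :: rest => (a, b, c, d) :: pvEveryN4 rest
  | _ => []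

-- the `while True: args = next(it); yield …; args = next(it); yield …` loop:
-- StopIteration after the first yield of a round still leaves that yield emitted.
def pvLoopA : List (Int × Int × Int × Int) → List (String × List Int)
  | [] => []
  | [(a, b, c, d)] => [("rrcurveto", [a, 0, b, c, 0, d])]
  | (a, b, c, d) :: (e, f, g, h) :: rest =>
      ("rrcurveto", [a, 0, b, c, 0, d]) :: ("rrcurveto", [0, e, f, g, h, 0]) :: pvLoopA rest

def hvcurveto (args : List Int) : List (String × List Int) :=
  if args.length < 4 ∨ ¬(args.length % 8 = 0 ∨ args.length % 8 = 1 ∨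
      args.length % 8 = 4 ∨ args.length % 8 = 5) then
    []  -- Python raises ValueError here; excluded by Pre_hvcurveto
  else
    let p : List Int × List Int :=
      if args.length % 2 = 1 then
        (PySem.List.slice args none (some (-5)), PySem.List.slice args (some (-5)) none)
      else (args, [])
    pvLoopA (pvEveryN4 p.1) ++
      (match p.2 with
       | [a, b, c, d, e] =>
           if args.length % 8 = 5 then [("rrcurveto", [a, 0, b, c, e, d])]
           else [("rrcurveto", [0, a, b, c, d, e])]
       | _ => [])  -- `if last_args:`—last_args is [] (falsy) or a 5-element list (truthy)

-- ===== PORT B =====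
-- the module-level table _POS and the fresh 6-slot buffer [0]*6
def pvPOS : List Int := [0, 2, 3, 5, 1, 2, 3, 4]
def pvZeros : List Int := [0, 0, 0, 0, 0, 0]

-- one iteration of B's `for k in range(body_len)` loop; state = (out, buf, phase)
def pvStepB (args : List Int) (st : List (String × List Int) × List Int × Int) (k : Int) :
    List (String × List Int) × List Int × Int :=
  let buf' := PySem.List.pySetD st.2.1 (PySem.List.pyGetD pvPOS st.2.2 0)
      (PySem.List.pyGetD args k 0)
  let phase' := PySem.Int.mod (st.2.2 + 1) 8
  if PySem.Int.mod phase' 4 = 0 then (st.1 ++ [("rrcurveto", buf')], pvZeros, phase')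
  else (st.1, buf', phase')

def hvcurveto_alt (args : List Int) : List (String × List Int) :=
  let n : Int := PySem.List.len args
  if n < 4 ∨ ¬(PySem.Int.mod n 8 = 0 ∨ PySem.Int.mod n 8 = 1 ∨
      PySem.Int.mod n 8 = 4 ∨ PySem.Int.mod n 8 = 5) then
    []  -- Python raises ValueError here; excluded by Pre_hvcurveto
  else
    let bodyLen : Int := if PySem.Int.mod n 2 = 1 then n - 5 else n
    let st := (PySem.List.pyRange 0 bodyLen 1).foldl (pvStepB args) ([], pvZeros, 0)
    if PySem.Int.mod n 2 = 1 then
      let t := PySem.List.slice args (some bodyLen) none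
      if PySem.Int.mod n 8 = 5 then
        st.1 ++ [("rrcurveto", [PySem.List.pyGetD t 0 0, 0, PySem.List.pyGetD t 1 0,
                                PySem.List.pyGetD t 2 0, PySem.List.pyGetD t 4 0,
                                PySem.List.pyGetD t 3 0])]
      else
        st.1 ++ [("rrcurveto", [0, PySem.List.pyGetD t 0 0, PySem.List.pyGetD t 1 0,
                                PySem.List.pyGetD t 2 0, PySem.List.pyGetD t 3 0,
                                PySem.List.pyGetD t 4 0])]
    else st.1

-- ===== PRECONDITION & SPEC =====
-- exactly the inputs on which Python A returns normally (otherwise it raises ValueError)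
def Pre_hvcurveto (args : List Int) : Prop :=
  4 ≤ args.length ∧ (args.length % 8 = 0 ∨ args.length % 8 = 1 ∨
    args.length % 8 = 4 ∨ args.length % 8 = 5)
instance (args : List Int) : Decidable (Pre_hvcurveto args) := by
  unfold Pre_hvcurveto; infer_instance

def pvWitness_hvcurveto : List Int := [1, 2, 3, 4]

def Spec_hvcurveto (args : List Int) (out : List (String × List Int)) : Prop := out = hvcurveto_alt args
instance (args : List Int) (out : List (String × List Int)) : Decidable (Spec_hvcurveto args out) := by unfold Spec_hvcurveto; infer_instance

-- ===== CLAIM (what is proved, stated in full; the proofs are below) =====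
def Claim_equal_hvcurveto : Prop := ∀ (args : List Int), Dom_hvcurveto args → Pre_hvcurveto args → Spec_hvcurveto args (hvcurveto args)

-- ===== LEMMAS AND PROOFS =====

-- the k-th emitted curve, as a function of the chunk parity (proof-only abstraction
-- both loop lemmas are proved against)
def pvChunkEmit (k : Nat) (g : List Int) : String × List Int :=
  if k % 2 = 0 then ("rrcurveto", [g.getD 0 0, 0, g.getD 1 0, g.getD 2 0, 0, g.getD 3 0])
  else ("rrcurveto", [0, g.getD 0 0, g.getD 1 0, g.getD 2 0, g.getD 3 0, 0])

theorem pvChunkEmit_add_two (k : Nat) (g : List Int) :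
    pvChunkEmit (k + 2) g = pvChunkEmit k g := by
  simp [pvChunkEmit]

theorem pvChunk_getD (xs : List Int) (j i : Nat) (hi : i < 4) :
    ((xs.drop j).take 4).getD i 0 = xs.getD (j + i) 0 := by
  simp [List.getD, List.getElem?_drop, hi]

-- A's twin-emit recursion over the 4-chunks, in parity-map form
theorem pvLoop_eq : ∀ (m : Nat) (body : List Int), body.length = 4 * m →
    pvLoopA (pvEveryN4 body) =
      (List.range m).map (fun k => pvChunkEmit k ((body.drop (4 * k)).take 4)) := by
  intro m
  induction m using Nat.strong_induction_on with
  | _ m ih =>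
    match m with
    | 0 =>
      intro body h
      have : body = [] := List.eq_nil_of_length_eq_zero (by omega)
      subst this; simp [pvEveryN4, pvLoopA]
    | 1 =>
      intro body h
      match body with
      | [a, b, c, d] =>
        simp [pvEveryN4, pvLoopA, pvChunkEmit]
      | [] | [_] | [_, _] | [_, _, _] => exact absurd h (by intro hh; simp only [List.length_cons, List.length_nil] at hh; omega)
      | _ :: _ :: _ :: _ :: _ :: _ => exact absurd h (by intro hh; simp only [List.length_cons] at hh; omega)
    | (m' + 2) =>
      intro body h
      match body with
      | a :: b :: c :: d :: e :: f :: g :: hh :: rest =>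
        simp only [List.length_cons] at h
        have hrest : rest.length = 4 * m' := by omega
        simp only [pvEveryN4, pvLoopA]
        rw [ih m' (by omega) rest hrest]
        have hsplit : m' + 2 = 2 + m' := by omega
        rw [hsplit, List.range_add]
        have hrange2 : List.range 2 = [0, 1] := rfl
        rw [hrange2, List.map_append, List.map_map, List.map_cons, List.map_cons, List.map_nil]
        have hc0 : pvChunkEmit 0 (List.take 4 (List.drop (4 * 0) (a :: b :: c :: d :: e :: f :: g :: hh :: rest)))
            = ("rrcurveto", [a, 0, b, c, 0, d]) := rfl
        have hc1 : pvChunkEmit 1 (List.take 4 (List.drop (4 * 1) (a :: b :: c :: d :: e :: f :: g :: hh :: rest)))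
            = ("rrcurveto", [0, e, f, g, hh, 0]) := rfl
        rw [hc0, hc1]
        simp only [List.cons_append, List.nil_append, List.cons.injEq, true_and]
        apply List.map_congr_left
        intro k _
        simp only [Function.comp_apply]
        have hdrop : List.drop (4 * (2 + k)) (a :: b :: c :: d :: e :: f :: g :: hh :: rest)
            = List.drop (4 * k) rest := by
          have h8 : 4 * (2 + k) = 8 + 4 * k := by omega
          rw [h8, ← List.drop_drop]
          rfl
        rw [hdrop, show 2 + k = k + 2 from by omega, pvChunkEmit_add_two]
      | [] | [_] | [_, _] | [_, _, _] => exact absurd h (by intro hh; simp only [List.length_cons, List.length_nil] at hh; omega)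
      | [_, _, _, _] | [_, _, _, _, _] | [_, _, _, _, _, _] | [_, _, _, _, _, _, _] =>
        exact absurd h (by intro hh; simp only [List.length_cons, List.length_nil] at hh; omega)

-- B's state-machine fold over one 4-element round, then by induction over the rounds
theorem pvFoldB (args : List Int) : ∀ (m j p : Nat) (acc : List (String × List Int)),
    (p = 0 ∨ p = 4) →
    (PySem.List.pyRange (j : Int) ((j : Int) + 4 * (m : Int)) 1).foldl (pvStepB args)
        (acc, pvZeros, (p : Int)) =
      (acc ++ (List.range m).map (fun k => pvChunkEmit (k + p / 4) ((args.drop (j + 4 * k)).take 4)),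
       pvZeros, (((p + 4 * m) % 8 : Nat) : Int)) := by
  intro m
  induction m with
  | zero =>
    intro j p acc hp
    rw [show (j : Int) + 4 * ((0 : Nat) : Int) = (j : Int) by push_cast; ring,
      PySem.List.pyRange_one_eq_nil le_rfl]
    rcases hp with rfl | rfl <;> simp [List.foldl]
  | succ m ihm =>
    intro j p acc hp
    have h1 : (j : Int) ≤ (j : Int) + 4 := by omega
    have h2 : (j : Int) + 4 ≤ (j : Int) + 4 * ((m + 1 : Nat) : Int) := by push_cast; omega
    rw [PySem.List.pyRange_one_append _ ((j : Int) + 4) _ h1 h2, List.foldl_append]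
    have hr4 : PySem.List.pyRange (j : Int) ((j : Int) + 4) 1 =
        [(j : Int), (j : Int) + 1, (j : Int) + 2, (j : Int) + 3] := by
      rw [PySem.List.pyRange_one_cons (by omega), PySem.List.pyRange_one_cons (by omega),
        PySem.List.pyRange_one_cons (by omega), PySem.List.pyRange_one_cons (by omega),
        PySem.List.pyRange_one_eq_nil (by omega)]
      norm_num
      omega
    rw [hr4]
    have hcast1 : (j : Int) + 4 = ((j + 4 : Nat) : Int) := by push_cast; ring
    have hcast2 : (j : Int) + 4 * ((m + 1 : Nat) : Int) = ((j + 4 : Nat) : Int) + 4 * (m : Int) := by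
      push_cast; ring
    rcases hp with rfl | rfl
    · have hfold4 : List.foldl (pvStepB args) (acc, pvZeros, ((0 : Nat) : Int))
          [(j : Int), (j : Int) + 1, (j : Int) + 2, (j : Int) + 3] =
          (acc ++ [("rrcurveto", [PySem.List.pyGetD args (j : Int) 0, 0,
              PySem.List.pyGetD args ((j : Int) + 1) 0, PySem.List.pyGetD args ((j : Int) + 2) 0, 0,
              PySem.List.pyGetD args ((j : Int) + 3) 0])], pvZeros, ((4 : Nat) : Int)) := rfl
      rw [hfold4, hcast1, hcast2, ihm (j + 4) 4 _ (Or.inr rfl)]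
      refine Prod.ext ?_ (Prod.ext rfl ?_)
      · show acc ++ _ ++ _ = acc ++ _
        rw [List.append_assoc, List.range_succ_eq_map, List.map_cons, List.map_map]
        congr 1
        rw [List.cons_append, List.nil_append]
        congr 1
        · show _ = pvChunkEmit (0 + 0 / 4) ((args.drop (j + 4 * 0)).take 4)
          rw [show (0 : Nat) + 0 / 4 = 0 from rfl, show j + 4 * 0 = j from by omega]
          rw [show ((j : Int) + 1) = ((j + 1 : Nat) : Int) by push_cast; ring,
            show ((j : Int) + 2) = ((j + 2 : Nat) : Int) by push_cast; ring,
            show ((j : Int) + 3) = ((j + 3 : Nat) : Int) by push_cast; ring]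
          simp only [PySem.List.pyGetD_natCast]
          rw [pvChunkEmit, if_pos rfl, pvChunk_getD args j 0 (by omega),
            pvChunk_getD args j 1 (by omega), pvChunk_getD args j 2 (by omega),
            pvChunk_getD args j 3 (by omega)]
          rw [show j + 0 = j from rfl]
        · apply List.map_congr_left
          intro k _
          show pvChunkEmit (k + 4 / 4) ((args.drop (j + 4 + 4 * k)).take 4) =
            pvChunkEmit (k.succ + 0 / 4) ((args.drop (j + 4 * k.succ)).take 4)
          rw [show j + 4 + 4 * k = j + 4 * k.succ from by omega,
            show k + 4 / 4 = k.succ + 0 / 4 from by omega]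
      · show (((4 + 4 * m) % 8 : Nat) : Int) = (((0 + 4 * (m + 1)) % 8 : Nat) : Int)
        congr 1
        omega
    · have hfold4 : List.foldl (pvStepB args) (acc, pvZeros, ((4 : Nat) : Int))
          [(j : Int), (j : Int) + 1, (j : Int) + 2, (j : Int) + 3] =
          (acc ++ [("rrcurveto", [0, PySem.List.pyGetD args (j : Int) 0,
              PySem.List.pyGetD args ((j : Int) + 1) 0, PySem.List.pyGetD args ((j : Int) + 2) 0,
              PySem.List.pyGetD args ((j : Int) + 3) 0, 0])], pvZeros, ((0 : Nat) : Int)) := rfl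
      rw [hfold4, hcast1, hcast2, ihm (j + 4) 0 _ (Or.inl rfl)]
      refine Prod.ext ?_ (Prod.ext rfl ?_)
      · show acc ++ _ ++ _ = acc ++ _
        rw [List.append_assoc, List.range_succ_eq_map, List.map_cons, List.map_map]
        congr 1
        rw [List.cons_append, List.nil_append]
        congr 1
        · show _ = pvChunkEmit (0 + 4 / 4) ((args.drop (j + 4 * 0)).take 4)
          rw [show (0 : Nat) + 4 / 4 = 1 from rfl, show j + 4 * 0 = j from by omega]
          rw [show ((j : Int) + 1) = ((j + 1 : Nat) : Int) by push_cast; ring,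
            show ((j : Int) + 2) = ((j + 2 : Nat) : Int) by push_cast; ring,
            show ((j : Int) + 3) = ((j + 3 : Nat) : Int) by push_cast; ring]
          simp only [PySem.List.pyGetD_natCast]
          rw [pvChunkEmit, if_neg (by omega), pvChunk_getD args j 0 (by omega),
            pvChunk_getD args j 1 (by omega), pvChunk_getD args j 2 (by omega),
            pvChunk_getD args j 3 (by omega)]
          rw [show j + 0 = j from rfl]
        · apply List.map_congr_left
          intro k _
          show pvChunkEmit (k + 0 / 4) ((args.drop (j + 4 + 4 * k)).take 4) =
            pvChunkEmit (k.succ + 4 / 4) ((args.drop (j + 4 * k.succ)).take 4)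
          rw [show j + 4 + 4 * k = j + 4 * k.succ from by omega,
            show k.succ + 4 / 4 = (k + 0 / 4) + 2 from by omega, pvChunkEmit_add_two]
          norm_num
      · show (((0 + 4 * m) % 8 : Nat) : Int) = (((4 + 4 * (m + 1)) % 8 : Nat) : Int)
        congr 1
        omega

theorem pvH0 (a b c d e : Int) : PySem.List.pyGetD [a, b, c, d, e] 0 0 = a := rfl
theorem pvH1 (a b c d e : Int) : PySem.List.pyGetD [a, b, c, d, e] 1 0 = b := rfl
theorem pvH2 (a b c d e : Int) : PySem.List.pyGetD [a, b, c, d, e] 2 0 = c := rfl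
theorem pvH3 (a b c d e : Int) : PySem.List.pyGetD [a, b, c, d, e] 3 0 = d := rfl
theorem pvH4 (a b c d e : Int) : PySem.List.pyGetD [a, b, c, d, e] 4 0 = e := rfl

theorem pvLen5 {l : List Int} (h : l.length = 5) : ∃ a b c d e, l = [a, b, c, d, e] := by
  match l, h with
  | [a, b, c, d, e], _ => exact ⟨a, b, c, d, e, rfl⟩

-- both loop lemmas give maps over the rounds; the bodies agree chunk by chunk
theorem pvMaps_eq (args : List Int) (L m : Nat) (h4 : L = 4 * m) :
    (List.range m).map (fun k => pvChunkEmit k (((args.take L).drop (4 * k)).take 4)) =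
      (List.range m).map (fun k => pvChunkEmit (k + 0 / 4) ((args.drop (0 + 4 * k)).take 4)) := by
  apply List.map_congr_left
  intro k hk
  rw [List.mem_range] at hk
  rw [List.drop_take, List.take_take, show min 4 (L - 4 * k) = 4 from by omega,
    show (0 : Nat) + 4 * k = 4 * k from by omega, show k + 0 / 4 = k from by omega]

-- ===== VERDICT (by name: the statement is the Claim_ definition above) =====
theorem hvcurveto_spec : Claim_equal_hvcurveto := by
  intro args _ hpre
  obtain ⟨hlen, hmod⟩ := hpre
  unfold Spec_hvcurveto hvcurveto hvcurveto_alt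
  simp only [PySem.List.len_eq]
  have hm8 : PySem.Int.mod (↑args.length) 8 = ((args.length % 8 : Nat) : Int) := by
    exact_mod_cast PySem.Int.mod_natCast args.length 8
  have hm2 : PySem.Int.mod (↑args.length) 2 = ((args.length % 2 : Nat) : Int) := by
    exact_mod_cast PySem.Int.mod_natCast args.length 2
  simp only [hm8, hm2]
  have gA : ¬(args.length < 4 ∨ ¬(args.length % 8 = 0 ∨ args.length % 8 = 1 ∨
      args.length % 8 = 4 ∨ args.length % 8 = 5)) := by omega
  have gB : ¬((↑args.length : Int) < 4 ∨ ¬(((args.length % 8 : Nat) : Int) = 0 ∨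
      ((args.length % 8 : Nat) : Int) = 1 ∨ ((args.length % 8 : Nat) : Int) = 4 ∨
      ((args.length % 8 : Nat) : Int) = 5)) := by push_cast; omega
  rw [if_neg gA, if_neg gB]
  by_cases hodd : args.length % 2 = 1
  · -- odd length: the last 5 arguments form the trailing group
    have h5le : 5 ≤ args.length := by omega
    have hA1 : PySem.List.slice args none (some (-5)) = List.take (args.length - 5) args :=
      PySem.List.slice_to_neg_ofNat args 5 (by omega)
    have hA2 : PySem.List.slice args (some (-5)) none = List.drop (args.length - 5) args :=
      PySem.List.slice_from_neg_ofNat args 5 (by omega)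
    have hoddI : ((args.length % 2 : Nat) : Int) = 1 := by omega
    have hB2 : PySem.List.slice args (some ((args.length : Int) - 5)) none =
        List.drop (args.length - 5) args := by
      have := PySem.List.slice_from (xs := args) (a := (args.length : Int) - 5) (by omega)
      rw [this, show ((args.length : Int) - 5).toNat = args.length - 5 from by omega]
    simp only [if_pos hodd, if_pos hoddI, hA1, hA2, hB2]
    have hTlen : (List.drop (args.length - 5) args).length = 5 := by
      rw [List.length_drop]; omega
    obtain ⟨t0, t1, t2, t3, t4, hT⟩ := pvLen5 hTlen
    rw [hT]
    dsimp only
    have h4m : args.length - 5 = 4 * ((args.length - 5) / 4) := by omega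
    have hbl : (List.take (args.length - 5) args).length = 4 * ((args.length - 5) / 4) := by
      rw [List.length_take]; omega
    have hend : ((args.length : Int) - 5) = 0 + 4 * (((args.length - 5) / 4 : Nat) : Int) := by
      push_cast; omega
    have hfold := pvFoldB args ((args.length - 5) / 4) 0 0 [] (Or.inl rfl)
    simp only [Nat.cast_zero] at hfold
    rw [pvLoop_eq _ _ hbl, hend, hfold]
    dsimp only
    rw [List.nil_append, pvMaps_eq args _ _ h4m]
    by_cases h8 : args.length % 8 = 5
    · rw [if_pos h8, if_pos (show ((args.length % 8 : Nat) : Int) = 5 by omega),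
        pvH0, pvH1, pvH2, pvH3, pvH4]
    · rw [if_neg h8, if_neg (show ¬((args.length % 8 : Nat) : Int) = 5 by omega),
        pvH0, pvH1, pvH2, pvH3, pvH4]
  · -- even length: every argument is consumed by the main loop
    have hoddI : ¬((args.length % 2 : Nat) : Int) = 1 := by omega
    simp only [if_neg hodd, if_neg hoddI]
    have h4m : args.length = 4 * (args.length / 4) := by omega
    have hend : ((args.length : Int)) = 0 + 4 * ((args.length / 4 : Nat) : Int) := by
      push_cast; omega
    have hfold := pvFoldB args (args.length / 4) 0 0 [] (Or.inl rfl)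
    simp only [Nat.cast_zero] at hfold
    rw [List.append_nil, pvLoop_eq _ _ h4m, hend, hfold]
    dsimp only
    rw [List.nil_append]
    apply List.map_congr_left
    intro k _
    rw [show (0 : Nat) + 4 * k = 4 * k from by omega, show k + 0 / 4 = k from by omega]
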